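-- pv_equiv track=rewrite | github.com/andreasgriffin/bitcoin-nostr-chat | bitcoin_nostr_chat/ui/util.py | insert_invisible_spaces_for_wordwrap
-- ===== SOURCE A (Python) =====
-- def insert_invisible_spaces_for_wordwrap(s: str, max_word_length: int = 20) -> str:
--     """
--     Insert zero-width spaces (\u200B) into any word in `s` that exceeds max_word_length,
--     so that it can be wrapped by browsers or text renderers.
--
--     :param s: Input string.
--     :param max_word_length: Maximum allowed length of a continuous word before inserting \u200B.
--     :return: Modified string with \u200B inserted into long words.
--     """
--     words = s.split(" ")
--     processed = []
--
--     for word in words: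
--         if len(word) <= max_word_length:
--             # Short enough, leave as-is
--             processed.append(word)
--         else:
--             # Break the word into chunks of max_word_length
--             parts = [word[i : i + max_word_length] for i in range(0, len(word), max_word_length)]
--             # Rejoin with zero-width spaces between chunks
--             processed.append("\u200B".join(parts))
--
--     return " ".join(processed)
-- ===== SOURCE B (Python) =====
-- def insert_invisible_spaces_for_wordwrap(s: str, max_word_length: int = 20) -> str:
--     # Single pass over the characters: keep the length of the current word run;
--     # emit a zero-width space before a character that would make the run exceed max_word_length.
--     out = []
--     count = 0
--     for ch in s:
--         if ch == " ":
--             out.append(ch)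
--             count = 0
--         elif count == max_word_length:
--             out.append("\u200B")
--             out.append(ch)
--             count = 1
--         else:
--             out.append(ch)
--             count += 1
--     return "".join(out)
-- ===== Notes on version B (the rewrite author's own statement) =====
-- stated objective: simpler
-- what changed: replaces split-into-words plus per-word slicing into chunks and double rejoin by a single character-level pass that counts the current word run and emits a zero-width space whenever the run reaches max_word_length
-- outside the precondition, e.g. on insert_invisible_spaces_for_wordwrap('abc', -1): A returns '', B returns 'abc'; on insert_invisible_spaces_for_wordwrap('a b', 0): A raises ValueError, B returns '\u200ba \u200bb'
import Mathlib
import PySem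

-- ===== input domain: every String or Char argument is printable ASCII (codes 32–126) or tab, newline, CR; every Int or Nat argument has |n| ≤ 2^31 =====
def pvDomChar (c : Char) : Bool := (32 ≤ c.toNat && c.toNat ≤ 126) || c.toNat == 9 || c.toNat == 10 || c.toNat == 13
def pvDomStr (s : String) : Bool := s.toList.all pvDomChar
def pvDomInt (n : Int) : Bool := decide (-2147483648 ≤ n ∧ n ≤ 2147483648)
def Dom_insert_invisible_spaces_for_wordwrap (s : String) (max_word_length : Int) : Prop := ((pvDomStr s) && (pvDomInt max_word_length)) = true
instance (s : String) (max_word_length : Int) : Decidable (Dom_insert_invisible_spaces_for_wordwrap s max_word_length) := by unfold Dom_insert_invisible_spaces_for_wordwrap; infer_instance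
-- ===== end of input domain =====

-- B replaces A's split-into-words + per-word chunk slicing + double rejoin by one
-- character-level pass with a word-run counter (objective: simpler); return values agree for max_word_length ≥ 1.


-- ===== PORT A =====
def insert_invisible_spaces_for_wordwrap (s : String) (max_word_length : Int) : String :=
  let words := PySem.Chars.splitOn s.toList " ".toList
  let processed : List (List Char) := words.foldl (fun acc word =>
    if (word.length : Int) ≤ max_word_length then
      acc ++ [word]
    else
      let parts := (PySem.List.pyRange 0 (word.length : Int) max_word_length).map
        (fun i => PySem.Chars.slice word (some i) (some (i + max_word_length)))
      acc ++ [PySem.Chars.join ['\u200B'] parts]) []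
  String.ofList (PySem.Chars.join [' '] processed)

-- ===== PORT B =====
def insert_invisible_spaces_for_wordwrap_alt (s : String) (max_word_length : Int) : String :=
  let r := s.toList.foldl (fun (st : List Char × Int) ch =>
    if ch = ' ' then (st.1 ++ [ch], 0)
    else if st.2 = max_word_length then (st.1 ++ ['\u200B', ch], 1)
    else (st.1 ++ [ch], st.2 + 1)) ([], 0)
  String.ofList r.1

-- ===== PRECONDITION & SPEC =====
-- Pre_ restricts to the natural domain max_word_length ≥ 1: for max_word_length = 0 Python A raises
-- ValueError (range step 0) whenever some word is nonempty, and for negative max_word_length A's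
-- slicing silently deletes every word (an accident of range with a negative step), outside the
-- function's natural domain.
def Pre_insert_invisible_spaces_for_wordwrap (s : String) (max_word_length : Int) : Prop :=
  1 ≤ max_word_length
instance (s : String) (max_word_length : Int) : Decidable (Pre_insert_invisible_spaces_for_wordwrap s max_word_length) := by unfold Pre_insert_invisible_spaces_for_wordwrap; infer_instance

def pvWitness_insert_invisible_spaces_for_wordwrap : String × Int := ("ab cdef", 3)

def Spec_insert_invisible_spaces_for_wordwrap (s : String) (max_word_length : Int) (out : String) : Prop := out = insert_invisible_spaces_for_wordwrap_alt s max_word_length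
instance (s : String) (max_word_length : Int) (out : String) : Decidable (Spec_insert_invisible_spaces_for_wordwrap s max_word_length out) := by unfold Spec_insert_invisible_spaces_for_wordwrap; infer_instance

-- ===== CLAIM (what is proved, stated in full; the proofs are below) =====
def Claim_equal_insert_invisible_spaces_for_wordwrap : Prop := ∀ (s : String) (max_word_length : Int), Dom_insert_invisible_spaces_for_wordwrap s max_word_length → Pre_insert_invisible_spaces_for_wordwrap s max_word_length → Spec_insert_invisible_spaces_for_wordwrap s max_word_length (insert_invisible_spaces_for_wordwrap s max_word_length)

-- ===== LEMMAS AND PROOFS =====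

-- Python split(" ") as a plain structural recursion.
def splitSp : List Char → List (List Char)
  | [] => [[]]
  | c :: cs =>
    if c = ' ' then [] :: splitSp cs
    else
      match splitSp cs with
      | [] => [[c]]
      | h :: t => (c :: h) :: t

def consHead (p : List Char) : List (List Char) → List (List Char)
  | [] => [p]
  | h :: t => (p ++ h) :: t

-- counter scan of a single word starting at count k
def wchunk (m : Int) : Int → List Char → List Char
  | _, [] => []
  | k, c :: cs => if k = m then '\u200B' :: c :: wchunk m 1 cs else c :: wchunk m (k + 1) cs

-- counter scan of the whole string (B's loop as a recursion)
def scanGo (m : Int) : Int → List Char → List Char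
  | _, [] => []
  | k, c :: cs =>
    if c = ' ' then c :: scanGo m 0 cs
    else if k = m then '\u200B' :: c :: scanGo m 1 cs
    else c :: scanGo m (k + 1) cs

-- A's chunk list for one word
def partsA (m : Int) (w : List Char) : List (List Char) :=
  (PySem.List.pyRange 0 (w.length : Int) m).map
    (fun i => PySem.Chars.slice w (some i) (some (i + m)))

def chunkA (m : Int) (w : List Char) : List Char :=
  if (w.length : Int) ≤ m then w else PySem.Chars.join ['\u200B'] (partsA m w)

theorem splitSp_ne_nil (cs : List Char) : splitSp cs ≠ [] := by
  induction cs with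
  | nil => simp [splitSp]
  | cons c cs ih =>
    simp only [splitSp]
    split
    · simp
    · cases h : splitSp cs with
      | nil => simp
      | cons hd tl => simp


theorem splitSp_no_space (cs : List Char) : ∀ w ∈ splitSp cs, ' ' ∉ w := by
  induction cs with
  | nil => simp [splitSp]
  | cons c cs ih =>
    simp only [splitSp]
    split
    · intro w hw
      rcases List.mem_cons.mp hw with h | h
      · simp [h]
      · exact ih w h
    · rename_i hc
      cases h : splitSp cs with
      | nil =>
        intro w hw
        simp at hw
        subst hw
        intro hsp
        simp at hsp
        exact hc hsp.symm
      | cons hd tl =>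
        intro w hw
        rcases List.mem_cons.mp hw with h1 | h1
        · subst h1
          intro hmem
          rcases List.mem_cons.mp hmem with h2 | h2
          · exact hc h2.symm
          · exact ih hd (by simp [h]) h2
        · exact ih w (by rw [h]; exact List.mem_cons_of_mem _ h1)


theorem join_splitSp (cs : List Char) : PySem.Chars.join [' '] (splitSp cs) = cs := by
  induction cs with
  | nil => rw [show splitSp [] = [[]] by simp [splitSp], PySem.Chars.join_singleton]
  | cons c cs ih =>
    simp only [splitSp]
    split
    · rename_i hc
      subst hc
      cases h : splitSp cs with
      | nil => exact absurd h (splitSp_ne_nil cs)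
      | cons hd tl =>
        rw [PySem.Chars.join_cons_cons]
        rw [h] at ih
        simp [ih]
    · cases h : splitSp cs with
      | nil => exact absurd h (splitSp_ne_nil cs)
      | cons hd tl =>
        rw [h] at ih
        cases tl with
        | nil => simp_all [PySem.Chars.join_singleton]
        | cons q qs =>
          rw [PySem.Chars.join_cons_cons] at ih ⊢
          rw [← ih]
          simp


theorem splitOn_go_eq (fuel : Nat) : ∀ (l cur : List Char) (acc : List (List Char)),
    l.length < fuel →
    PySem.Chars.splitOn.go [' '] fuel l cur acc = acc.reverse ++ consHead cur.reverse (splitSp l) := by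
  induction fuel with
  | zero => intro l cur acc h; omega
  | succ f ih =>
    intro l cur acc h
    cases l with
    | nil =>
      have h1 : PySem.Chars.splitOn.go [' '] (f + 1) [] cur acc = ((cur.reverse ++ []) :: acc).reverse := by
        simp [PySem.Chars.splitOn.go]
      rw [h1]
      simp [splitSp, consHead]
    | cons c rest =>
      have h1 : PySem.Chars.splitOn.go [' '] (f + 1) (c :: rest) cur acc =
          if (' ' == c) then PySem.Chars.splitOn.go [' '] f rest [] (cur.reverse :: acc)
          else PySem.Chars.splitOn.go [' '] f rest (c :: cur) acc := by
        rw [PySem.Chars.splitOn.go]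
        simp [List.isPrefixOf]
      rw [h1]
      simp only [List.length_cons] at h
      by_cases hc : c = ' '
      · rw [if_pos (by simp [hc]), ih rest [] (cur.reverse :: acc) (by omega)]
        cases hs : splitSp rest with
        | nil => exact absurd hs (splitSp_ne_nil rest)
        | cons hd tl => simp [splitSp, hc, consHead, hs]
      · rw [if_neg (by simp [Ne.symm hc]), ih rest (c :: cur) acc (by omega)]
        cases hs : splitSp rest with
        | nil => exact absurd hs (splitSp_ne_nil rest)
        | cons hd tl => simp [splitSp, hc, consHead, hs]


theorem splitOn_eq_splitSp (cs : List Char) : PySem.Chars.splitOn cs [' '] = splitSp cs := by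
  rw [PySem.Chars.splitOn, splitOn_go_eq (cs.length + 1) cs [] [] (by omega)]
  cases hs : splitSp cs with
  | nil => exact absurd hs (splitSp_ne_nil cs)
  | cons hd tl => simp [consHead]


theorem foldl_append_singleton {α β : Type} (f : α → β) (l : List α) :
    l.foldl (fun acc x => acc ++ [f x]) [] = l.map f := by
  have h : ∀ (acc : List β), l.foldl (fun acc x => acc ++ [f x]) acc = acc ++ l.map f := by
    induction l with
    | nil => simp
    | cons x xs ih => intro acc; simp [List.foldl_cons, ih]
  simpa using h []


theorem scanGo_eq_wchunk (m : Int) (w : List Char) (hw : ' ' ∉ w) (k : Int) :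
    scanGo m k w = wchunk m k w := by
  induction w generalizing k with
  | nil => simp [scanGo, wchunk]
  | cons c cs ih =>
    have hc : c ≠ ' ' := fun h => hw (by simp [h])
    have hcs : ' ' ∉ cs := fun h => hw (by simp [h])
    simp only [scanGo, wchunk, if_neg hc]
    split <;> simp [ih hcs]


theorem scanGo_word_space (m : Int) (w : List Char) (hw : ' ' ∉ w) (rest : List Char) (k : Int) :
    scanGo m k (w ++ ' ' :: rest) = wchunk m k w ++ ' ' :: scanGo m 0 rest := by
  induction w generalizing k with
  | nil => simp [scanGo, wchunk]
  | cons c cs ih =>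
    have hc : c ≠ ' ' := fun h => hw (by simp [h])
    have hcs : ' ' ∉ cs := fun h => hw (by simp [h])
    simp only [List.cons_append, scanGo, wchunk, if_neg hc]
    split <;> simp [ih hcs]


theorem wchunk_small (m : Int) (w : List Char) (k : Int) (hk : 0 ≤ k)
    (h : k + w.length ≤ m) : wchunk m k w = w := by
  induction w generalizing k with
  | nil => simp [wchunk]
  | cons c cs ih =>
    simp only [List.length_cons] at h
    have hkm : k ≠ m := by push_cast at h; omega
    simp only [wchunk, if_neg hkm]
    rw [ih (k + 1) (by omega) (by push_cast at h ⊢; omega)]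


theorem wchunk_split (m : Int) (hm : 1 ≤ m) (w : List Char) (k : Int) (hk0 : 0 ≤ k)
    (hkm : k ≤ m) (h : m < k + w.length) :
    wchunk m k w = w.take (m - k).toNat ++ '\u200B' :: wchunk m 0 (w.drop (m - k).toNat) := by
  induction w generalizing k with
  | nil => simp at h; omega
  | cons c cs ih =>
    by_cases hk : k = m
    · have h0 : (m - k).toNat = 0 := by omega
      simp only [wchunk, if_pos hk, h0, List.take_zero, List.drop_zero, List.nil_append]
      have hm0 : ¬ (0 : Int) = m := by omega
      simp [if_neg hm0]
    · have hkm' : k < m := lt_of_le_of_ne hkm hk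
      have ht : (m - k).toNat = ((m - (k + 1)).toNat) + 1 := by omega
      simp only [wchunk, if_neg hk, ht, List.take_succ_cons, List.drop_succ_cons]
      rw [ih (k + 1) (by omega) (by omega) (by simp at h; omega)]
      simp


theorem pyRange_pos_cons (m b : Int) (hm : 1 ≤ m) (hb : 0 < b) :
    PySem.List.pyRange 0 b m = 0 :: PySem.List.pyRange m b m := by
  have hm0 : (0:Int) < m := by omega
  rw [PySem.List.pyRange_of_pos 0 b hm0, PySem.List.pyRange_of_pos m b hm0]
  have hge : 0 ≤ (b - 1) / m := Int.ediv_nonneg (by omega) (by omega)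
  have hdiv : (b - 0 + m - 1) / m = (b - 1) / m + 1 := by
    have h1 : b - 0 + m - 1 = (b - 1) + 1 * m := by ring
    rw [h1, Int.add_mul_ediv_right _ _ (by omega : m ≠ 0)]
  have hcnt : (if (0:Int) < b then ((b - 0 + m - 1) / m).toNat else 0)
      = (if m < b then ((b - m + m - 1) / m).toNat else 0) + 1 := by
    rw [if_pos hb]
    by_cases hb2 : m < b
    · rw [if_pos hb2]
      have h2 : b - m + m - 1 = b - 1 := by ring
      rw [h2, hdiv]
      omega
    · rw [if_neg hb2]
      have hz : (b - 1) / m = 0 := Int.ediv_eq_zero_of_lt (by omega) (by omega)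
      rw [hdiv, hz]
      omega
  rw [hcnt, List.range_succ_eq_map]
  simp only [List.map_cons, List.map_map]
  congr 1
  · simp
  · apply List.map_congr_left
    intro k _
    simp only [Function.comp_apply]
    push_cast
    ring


theorem pyRange_shift (m b : Int) (hm : 1 ≤ m) :
    PySem.List.pyRange m b m = (PySem.List.pyRange 0 (b - m) m).map (fun i => m + i) := by
  have hm0 : (0:Int) < m := by omega
  rw [PySem.List.pyRange_of_pos 0 (b - m) hm0, PySem.List.pyRange_of_pos m b hm0]
  have hcnt : (if m < b then ((b - m + m - 1) / m).toNat else 0)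
      = (if 0 < b - m then ((b - m - 0 + m - 1) / m).toNat else 0) := by
    by_cases hb2 : m < b
    · rw [if_pos hb2, if_pos (by omega)]
      congr 2
      ring
    · rw [if_neg hb2, if_neg (by omega)]
  rw [hcnt, List.map_map]
  apply List.map_congr_left
  intro k _
  simp only [Function.comp_apply]
  ring


theorem parts_cons (m : Int) (hm : 1 ≤ m) (w : List Char) (hw : w ≠ []) :
    partsA m w = w.take m.toNat :: partsA m (w.drop m.toNat) := by
  have hb : (0:Int) < (w.length : Int) := by
    have : 0 < w.length := List.length_pos_of_ne_nil hw
    exact_mod_cast this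
  have hm0 : (0:Int) < m := by omega
  unfold partsA
  rw [pyRange_pos_cons m (w.length : Int) hm hb]
  simp only [List.map_cons]
  congr 1
  · simp only [PySem.Chars.slice_eq_listSlice]
    rw [PySem.List.slice_toNat w (by omega) (by omega)]
    simp
  · rw [pyRange_shift m (w.length : Int) hm, List.map_map]
    have hlen : ((w.drop m.toNat).length : Int) = if m ≤ (w.length : Int) then (w.length : Int) - m else 0 := by
      simp [List.length_drop]
      split <;> omega
    by_cases hbm : m ≤ (w.length : Int)
    · rw [hlen, if_pos hbm]
      apply List.map_congr_left
      intro i hi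
      have hi0 : 0 ≤ i := ((PySem.List.mem_pyRange_iff_of_pos hm0 i).mp hi).1
      simp only [Function.comp_apply, PySem.Chars.slice_eq_listSlice]
      rw [PySem.List.slice_toNat w (by omega) (by omega),
          PySem.List.slice_toNat (w.drop m.toNat) (by omega) (by omega)]
      rw [List.drop_drop]
      congr 1
      · omega
      · congr 1
        omega
    · have h1 : PySem.List.pyRange 0 ((w.length : Int) - m) m = [] := by
        rw [PySem.List.pyRange_of_pos 0 _ (by omega : (0:Int) < m), if_neg (by omega)]
        simp
      have h2 : PySem.List.pyRange 0 (((w.drop m.toNat).length : Int)) m = [] := by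
        rw [PySem.List.pyRange_of_pos 0 _ (by omega : (0:Int) < m), if_neg (by simp [List.length_drop]; omega)]
        simp
      rw [h1, h2]
      simp


theorem partsA_nil (m : Int) (hm : 1 ≤ m) : partsA m [] = [] := by
  unfold partsA
  simp only [List.length_nil, Nat.cast_zero]
  rw [PySem.List.pyRange_of_pos 0 0 (by omega : (0:Int) < m), if_neg (by omega)]
  simp

theorem join_partsA (m : Int) (hm : 1 ≤ m) (w : List Char) :
    PySem.Chars.join ['\u200B'] (partsA m w) = wchunk m 0 w := by
  generalize hl : w.length = n
  induction n using Nat.strong_induction_on generalizing w with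
  | _ n ih =>
    cases w with
    | nil =>
      rw [partsA_nil m hm, PySem.Chars.join_nil]
      simp [wchunk]
    | cons c cs =>
      have hne : (c :: cs) ≠ ([] : List Char) := by simp
      by_cases hsm : ((c :: cs).length : Int) ≤ m
      · rw [parts_cons m hm _ hne]
        have hd : (c :: cs).drop m.toNat = [] := List.drop_eq_nil_of_le (by omega)
        have ht : (c :: cs).take m.toNat = c :: cs := List.take_of_length_le (by omega)
        rw [hd, ht]
        rw [partsA_nil m hm, PySem.Chars.join_singleton]
        exact (wchunk_small m (c :: cs) 0 le_rfl (by omega)).symm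
      · rw [not_le] at hsm
        rw [parts_cons m hm _ hne]
        have hdne : (c :: cs).drop m.toNat ≠ [] := by
          intro h
          have := List.drop_eq_nil_iff.mp h
          omega
        rw [parts_cons m hm _ hdne]
        rw [show ((c :: cs).drop m.toNat).take m.toNat :: partsA m (((c :: cs).drop m.toNat).drop m.toNat)
              = partsA m ((c :: cs).drop m.toNat) from (parts_cons m hm _ hdne).symm]
        have hjoin : PySem.Chars.join ['\u200B'] ((c :: cs).take m.toNat :: partsA m ((c :: cs).drop m.toNat))
            = (c :: cs).take m.toNat ++ '\u200B' :: PySem.Chars.join ['\u200B'] (partsA m ((c :: cs).drop m.toNat)) := by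
          cases hp : partsA m ((c :: cs).drop m.toNat) with
          | nil =>
            exfalso
            rw [parts_cons m hm _ hdne] at hp
            simp at hp
          | cons p ps =>
            rw [PySem.Chars.join_cons_cons]
            simp
        rw [hjoin]
        rw [ih (((c :: cs).drop m.toNat).length) (by rw [← hl]; simp [List.length_drop]; omega) _ rfl]
        rw [wchunk_split m hm (c :: cs) 0 le_rfl (by omega) (by omega)]
        simp


theorem chunkA_eq_wchunk (m : Int) (hm : 1 ≤ m) (w : List Char) :
    chunkA m w = wchunk m 0 w := by
  unfold chunkA
  split
  · rename_i h
    exact (wchunk_small m w 0 le_rfl (by omega)).symm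
  · exact join_partsA m hm w


theorem scanGo_join (m : Int) (pieces : List (List Char)) (hne : pieces ≠ [])
    (hsp : ∀ w ∈ pieces, ' ' ∉ w) :
    scanGo m 0 (PySem.Chars.join [' '] pieces) =
      PySem.Chars.join [' '] (pieces.map (wchunk m 0)) := by
  induction pieces with
  | nil => exact absurd rfl hne
  | cons w ps ih =>
    cases ps with
    | nil =>
      rw [PySem.Chars.join_singleton]
      simp only [List.map_cons, List.map_nil, PySem.Chars.join_singleton]
      exact scanGo_eq_wchunk m w (hsp w (by simp)) 0
    | cons p ps' =>
      rw [PySem.Chars.join_cons_cons]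
      have h1 : w ++ [' '] ++ PySem.Chars.join [' '] (p :: ps') = w ++ ' ' :: PySem.Chars.join [' '] (p :: ps') := by simp
      rw [h1, scanGo_word_space m w (hsp w (by simp)) _ 0]
      rw [ih (by simp) (fun x hx => hsp x (List.mem_cons_of_mem _ hx))]
      simp only [List.map_cons]
      rw [PySem.Chars.join_cons_cons]
      simp


theorem foldB (m : Int) (cs : List Char) : ∀ (acc : List Char) (k : Int),
    (cs.foldl (fun (st : List Char × Int) ch =>
      if ch = ' ' then (st.1 ++ [ch], 0)
      else if st.2 = m then (st.1 ++ ['\u200B', ch], 1)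
      else (st.1 ++ [ch], st.2 + 1)) (acc, k)).1 = acc ++ scanGo m k cs := by
  induction cs with
  | nil => intro acc k; simp [scanGo]
  | cons c cs ih =>
    intro acc k
    simp only [List.foldl_cons, scanGo]
    by_cases hc : c = ' '
    · simp [hc, ih]
    · by_cases hk : k = m
      · simp [hc, hk, ih]
      · simp [hc, hk, ih]


-- ===== VERDICT (by name: the statement is the Claim_ definition above) =====
theorem insert_invisible_spaces_for_wordwrap_spec : Claim_equal_insert_invisible_spaces_for_wordwrap := by
  intro s m _hdom hpre
  unfold Pre_insert_invisible_spaces_for_wordwrap at hpre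
  unfold Spec_insert_invisible_spaces_for_wordwrap
  simp only [insert_invisible_spaces_for_wordwrap, insert_invisible_spaces_for_wordwrap_alt]
  rw [show (" ".toList) = [' '] from rfl]
  rw [splitOn_eq_splitSp]
  have hbody : (fun (acc : List (List Char)) (word : List Char) =>
      if (word.length : Int) ≤ m then acc ++ [word]
      else acc ++ [PySem.Chars.join ['\u200B'] ((PySem.List.pyRange 0 (word.length : Int) m).map
        (fun i => PySem.Chars.slice word (some i) (some (i + m))))])
      = (fun acc word => acc ++ [chunkA m word]) := by
    funext acc word
    by_cases h : (word.length : Int) ≤ m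
    · simp [chunkA, h]
    · simp [chunkA, partsA, h]
  rw [hbody, foldl_append_singleton (chunkA m) (splitSp s.toList)]
  rw [foldB m s.toList [] 0]
  simp only [List.nil_append]
  congr 1
  have hmap : (splitSp s.toList).map (chunkA m) = (splitSp s.toList).map (wchunk m 0) :=
    List.map_congr_left (fun w _ => chunkA_eq_wchunk m hpre w)
  rw [hmap]
  conv_rhs => rw [← join_splitSp s.toList]
  rw [scanGo_join m (splitSp s.toList) (splitSp_ne_nil s.toList) (splitSp_no_space s.toList)]
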